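-- pv_equiv track=rewrite | github.com/herlanin/codility | 10_prime_composite_numbers/peaks.py | solution
-- ===== SOURCE A (Python) =====
-- def solution(A):
--     from math import sqrt
--     A_len = len(A)
--     peaks_until_here = [0]*A_len
--     # Retrieve how many peaks exist from beginning to current
--     # position.
--     for index in range(1, A_len-1):
--         peaks_until_here[index] = peaks_until_here[index-1]
--         if A[index] > A[index-1] and A[index] > A[index+1]:
--             peaks_until_here[index] += 1
--     if A_len < 3 or peaks_until_here[-2] == 0:
--         # The array is too short to have a peak. OR
--         # There is no peak in this array.
--         return 0
--     peaks_until_here[-1] = peaks_until_here[-2]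
--     max_blocks = 0
--     # Compute every possible partition plan, and find out the
--     # one with most blocks.
--     for candidate in range(1, int(sqrt(A_len))+1, 1):
--         if A_len % candidate == 0:
--             blocks, block_size = candidate, A_len//candidate
--             # Check the first block.
--             if peaks_until_here[0] < peaks_until_here[block_size-1]:
--                 # Check the following blocks.
--                 for each_block in range(block_size, A_len, block_size):
--                     if peaks_until_here[each_block-1] == \
--                        peaks_until_here[each_block+block_size-1]:
--                         # No peak is found in the next block
--                         # This partition plan is not accepted
--                         break
--                 else:
--                     max_blocks = blocks
--             if candidate * candidate == A_len:
--                 # If candidate is equal to sqrt(A_len) exactly,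
--                 # candidate would equal to A_len//candidate.
--                 continue
--             block_size, blocks = candidate, A_len//candidate
--             # Check the first block.
--             if peaks_until_here[0] < peaks_until_here[block_size-1]:
--                 # Check the following blocks.
--                 for each_block in range(block_size, A_len, block_size):
--                     if peaks_until_here[each_block-1] == \
--                        peaks_until_here[each_block+block_size-1]:
--                         # No peak is found in the next block
--                         # This partition plan is not accepted
--                         break
--                 else:
--                     return blocks
--     return max_blocks
-- ===== SOURCE B (Python) =====
-- def solution(A):
--     n = len(A)
--     if n < 3:
--         return 0
--     prefix = [0] * n
--     for i in range(1, n - 1):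
--         prefix[i] = prefix[i - 1] + (1 if A[i - 1] < A[i] > A[i + 1] else 0)
--     prefix[n - 1] = prefix[n - 2]
--     if prefix[n - 1] == 0:
--         return 0
--     # Try block counts from largest to smallest; the first divisor of n
--     # whose every block contains a peak is the answer.
--     for num_blocks in range(n, 0, -1):
--         if n % num_blocks == 0:
--             size = n // num_blocks
--             if all(prefix[k * size + size - 1] > (prefix[k * size - 1] if k else 0)
--                    for k in range(num_blocks)):
--                 return num_blocks
--     return 0
-- ===== Notes on version B (the rewrite author's own statement) =====
-- stated objective: simpler
-- what changed: B drops A's sqrt(n) candidate enumeration with its paired small/large divisor checks, duplicated block-scan code and early return, and instead walks block counts from n down to 1, returning the first divisor of n whose every block contains a peak (checked with the same prefix peak-count array).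
import Mathlib
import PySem

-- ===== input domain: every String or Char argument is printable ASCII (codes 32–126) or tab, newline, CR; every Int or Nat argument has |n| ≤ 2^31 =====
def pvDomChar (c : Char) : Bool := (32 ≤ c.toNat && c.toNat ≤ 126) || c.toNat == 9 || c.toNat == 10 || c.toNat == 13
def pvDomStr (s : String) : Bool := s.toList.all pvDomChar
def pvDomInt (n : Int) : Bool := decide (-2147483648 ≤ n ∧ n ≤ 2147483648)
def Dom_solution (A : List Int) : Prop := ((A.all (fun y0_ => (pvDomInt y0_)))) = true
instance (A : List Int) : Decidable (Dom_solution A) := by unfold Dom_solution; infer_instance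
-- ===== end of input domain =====

-- B replaces A's √n divisor enumeration (with its paired small/large checks and early return)
-- by one descending loop over block counts, returning the first divisor whose every block has a
-- peak; objective: simpler.

-- ===== PORT A =====
-- body of 'for index in range(1, A_len-1)': peaks[index] = peaks[index-1]; if peak: peaks[index] += 1
-- (index ≥ 1 throughout the loop, so 'index.toNat' is the exact Python index)
def pvStepA (A : List Int) (p : List Int) (index : Int) : List Int :=
  let p := p.set index.toNat (PySem.List.pyGetD p (index - 1) 0)
  if PySem.List.pyGetD A index 0 > PySem.List.pyGetD A (index - 1) 0 ∧
     PySem.List.pyGetD A index 0 > PySem.List.pyGetD A (index + 1) 0 then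
    p.set index.toNat (PySem.List.pyGetD p index 0 + 1)
  else p

-- 'if peaks[0] < peaks[block_size-1]:' followed by the for…else scan of the remaining blocks;
-- true ⇔ the Python 'else:' branch runs (the for loop never breaks).  All indices read are in
-- range in every use, so pyGetD's default is never taken.
def pvCheckA (p : List Int) (A_len block_size : Int) : Bool :=
  decide (PySem.List.pyGetD p 0 0 < PySem.List.pyGetD p (block_size - 1) 0) &&
  (PySem.List.pyRange block_size A_len block_size).all (fun each_block =>
    !(PySem.List.pyGetD p (each_block - 1) 0 == PySem.List.pyGetD p (each_block + block_size - 1) 0))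

-- 'for candidate in range(1, int(sqrt(A_len))+1, 1)' with its early 'return blocks'
def pvLoopA (p : List Int) (A_len : Int) : List Int → Int → Int
  | [], max_blocks => max_blocks
  | candidate :: rest, max_blocks =>
    if PySem.Int.mod A_len candidate == 0 then
      let max_blocks := if pvCheckA p A_len (PySem.Int.floordiv A_len candidate) then candidate
                        else max_blocks
      if candidate * candidate == A_len then pvLoopA p A_len rest max_blocks
      else if pvCheckA p A_len candidate then PySem.Int.floordiv A_len candidate
      else pvLoopA p A_len rest max_blocks
    else pvLoopA p A_len rest max_blocks

def solution (A : List Int) : Int :=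
  let A_len : Int := (A.length : Int)
  let peaks := (PySem.List.pyRange 1 (A_len - 1) 1).foldl (pvStepA A) (List.replicate A.length 0)
  -- Python short-circuits 'A_len < 3 or peaks[-2] == 0'; when A_len < 3 pyGetD's default keeps
  -- the disjunction true exactly as Python's short circuit does (the branch returns 0 either way)
  if A_len < 3 ∨ PySem.List.pyGetD peaks (-2) 0 = 0 then 0
  else
    -- 'peaks[-1] = peaks[-2]' : index -1 is position len-1 (A_len ≥ 3 here)
    let peaks := peaks.set (A.length - 1) (PySem.List.pyGetD peaks (-2) 0)
    -- int(sqrt(A_len)) = ⌊√A_len⌋, exact for every length a list can have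
    pvLoopA peaks A_len (PySem.List.pyRange 1 ((Nat.sqrt A.length : Int) + 1) 1) 0

-- ===== PORT B =====
-- body of 'for i in range(1, n-1)': prefix[i] = prefix[i-1] + (1 if A[i-1] < A[i] > A[i+1] else 0)
def pvStepB (A : List Int) (p : List Int) (i : Int) : List Int :=
  p.set i.toNat (PySem.List.pyGetD p (i - 1) 0 +
    (if PySem.List.pyGetD A (i - 1) 0 < PySem.List.pyGetD A i 0 ∧
        PySem.List.pyGetD A i 0 > PySem.List.pyGetD A (i + 1) 0 then 1 else 0))

-- 'for num_blocks in range(n, 0, -1)' with its early 'return num_blocks'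
def pvLoopB (pre : List Int) (n : Int) : List Int → Int
  | [] => 0
  | num_blocks :: rest =>
    if PySem.Int.mod n num_blocks == 0 then
      let size := PySem.Int.floordiv n num_blocks
      if (PySem.List.pyRange 0 num_blocks 1).all (fun k =>
           decide (PySem.List.pyGetD pre (k * size + size - 1) 0 >
             (if k ≠ 0 then PySem.List.pyGetD pre (k * size - 1) 0 else 0))) then
        num_blocks
      else pvLoopB pre n rest
    else pvLoopB pre n rest

def solution_alt (A : List Int) : Int :=
  let n : Int := (A.length : Int)
  if n < 3 then 0
  else
    let pre := (PySem.List.pyRange 1 (n - 1) 1).foldl (pvStepB A) (List.replicate A.length 0)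
    let pre := pre.set (A.length - 1) (PySem.List.pyGetD pre (n - 2) 0)
    if PySem.List.pyGetD pre (n - 1) 0 == 0 then 0
    else pvLoopB pre n (PySem.List.pyRange n 0 (-1))

-- ===== PRECONDITION & SPEC =====
def Spec_solution (A : List Int) (out : Int) : Prop := out = solution_alt A
instance (A : List Int) (out : Int) : Decidable (Spec_solution A out) := by unfold Spec_solution; infer_instance

-- ===== CLAIM (what is proved, stated in full; the proofs are below) =====
def Claim_equal_solution : Prop := ∀ (A : List Int), Dom_solution A → Spec_solution A (solution A)

-- ===== LEMMAS AND PROOFS =====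

-- peak at position t (for 1 ≤ t ≤ len-2)
def pvPkB (A : List Int) (t : Nat) : Bool :=
  decide (A.getD (t-1) 0 < A.getD t 0 ∧ A.getD (t+1) 0 < A.getD t 0)

-- number of peaks at positions 1..i
def pvCnt (A : List Int) (i : Nat) : Int := ((List.range' 1 i).countP (pvPkB A) : Int)

-- value of the finished prefix array at index i (< len)
def pvG (A : List Int) (i : Nat) : Int := pvCnt A (min i (A.length - 2))

-- the prefix array both ports build, before and after the 'peaks[-1] = peaks[-2]' patch
def pvQ (A : List Int) : List Int :=
  (PySem.List.pyRange 1 ((A.length : Int) - 1) 1).foldl (pvStepB A) (List.replicate A.length 0)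
def pvFinal (A : List Int) : List Int :=
  (pvQ A).set (A.length - 1) (PySem.List.pyGetD (pvQ A) ((A.length : Int) - 2) 0)

-- validity of block count b (b blocks of size n//b, every block containing a peak), as B tests it
def pvVB (p : List Int) (n b : Int) : Bool :=
  decide (b ∣ n) &&
  (PySem.List.pyRange 0 b 1).all (fun k =>
    decide (PySem.List.pyGetD p (k * PySem.Int.floordiv n b + PySem.Int.floordiv n b - 1) 0 >
      (if k ≠ 0 then PySem.List.pyGetD p (k * PySem.Int.floordiv n b - 1) 0 else 0)))

-- greatest valid block count ≤ k (0 if none)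
def pvBest (p : List Int) (n : Int) : Nat → Int
  | 0 => 0
  | k+1 => if pvVB p n ((k : Int)+1) then ((k : Int)+1) else pvBest p n k

theorem pvCnt_succ (A : List Int) (m : Nat) (hm : 1 ≤ m) :
    pvCnt A m = pvCnt A (m-1) +
      (if A.getD (m-1) 0 < A.getD m 0 ∧ A.getD (m+1) 0 < A.getD m 0 then 1 else 0) := by
  have hr : List.range' 1 m = List.range' 1 (m-1) ++ [m] := by
    conv_lhs => rw [show m = (m-1)+1 by omega]
    rw [List.range'_1_concat]
    congr 2
    omega
  unfold pvCnt
  rw [hr, List.countP_append, List.countP_singleton]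
  by_cases hp : A.getD (m-1) 0 < A.getD m 0 ∧ A.getD (m+1) 0 < A.getD m 0
  · rw [if_pos hp, if_pos (by unfold pvPkB; exact decide_eq_true hp)]
    push_cast
    ring
  · rw [if_neg hp, if_neg (by unfold pvPkB; exact fun hc => hp (of_decide_eq_true hc))]
    push_cast
    ring

theorem pv_step_eq (A : List Int) (p : List Int) (i : Int) (hi : 1 ≤ i) :
    pvStepA A p i = pvStepB A p i := by
  unfold pvStepA pvStepB
  by_cases hk : i.toNat < p.length
  · have hread : PySem.List.pyGetD (p.set i.toNat (PySem.List.pyGetD p (i - 1) 0)) i 0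
        = PySem.List.pyGetD p (i - 1) 0 := by
      rw [PySem.List.pyGetD_of_nonneg _ _ (by omega), List.getD_eq_getElem?_getD,
        List.getElem?_set_self hk]
      rfl
    by_cases h : PySem.List.pyGetD A i 0 > PySem.List.pyGetD A (i-1) 0 ∧
        PySem.List.pyGetD A i 0 > PySem.List.pyGetD A (i+1) 0
    · rw [if_pos h, if_pos ⟨h.1, h.2⟩, hread, List.set_set]
    · rw [if_neg h, if_neg (fun hc => h ⟨hc.1, hc.2⟩), add_zero]
  · have hk' : p.length ≤ i.toNat := by omega
    rw [List.set_eq_of_length_le hk', List.set_eq_of_length_le hk']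
    by_cases h : PySem.List.pyGetD A i 0 > PySem.List.pyGetD A (i-1) 0 ∧
        PySem.List.pyGetD A i 0 > PySem.List.pyGetD A (i+1) 0
    · rw [if_pos h, List.set_eq_of_length_le hk']
    · rw [if_neg h]

theorem pv_fold_eq (A : List Int) :
    (PySem.List.pyRange 1 ((A.length : Int) - 1) 1).foldl (pvStepA A) (List.replicate A.length 0)
      = pvQ A := by
  unfold pvQ
  exact PySem.List.foldl_congr_mem _ _ _ _ (fun acc x hx => by
    have hx1 : 1 ≤ x := (PySem.List.mem_pyRange_one.mp hx).1
    exact pv_step_eq A acc x hx1)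

-- characterization of the build loop: after processing indices 1..m-1
theorem pv_build_spec (A : List Int) (m : Nat) (hm : m ≤ A.length - 1) :
    ((PySem.List.pyRange 1 (m : Int) 1).foldl (pvStepB A) (List.replicate A.length 0)).length
        = A.length ∧
    ∀ i : Nat, ((PySem.List.pyRange 1 (m : Int) 1).foldl (pvStepB A)
        (List.replicate A.length 0)).getD i 0
      = if 1 ≤ i ∧ i < m then pvCnt A i else 0 := by
  induction m with
  | zero =>
    rw [PySem.List.pyRange_one_eq_nil (by norm_num)]
    constructor
    · simp
    · intro i
      rw [if_neg (by omega)]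
      simp only [List.foldl_nil, List.getD_eq_getElem?_getD, List.getElem?_replicate]
      split <;> rfl
  | succ m ih =>
    rcases Nat.eq_zero_or_pos m with hm0 | hm1
    · subst hm0
      have hc : ((0+1 : Nat) : Int) = 1 := by norm_num
      rw [hc, PySem.List.pyRange_one_eq_nil le_rfl]
      constructor
      · simp
      · intro i
        rw [if_neg (by omega)]
        simp only [List.foldl_nil, List.getD_eq_getElem?_getD, List.getElem?_replicate]
        split <;> rfl
    · have hm' : m ≤ A.length - 1 := by omega
      obtain ⟨ihlen, ihval⟩ := ih hm'
      have hcast : ((m+1 : Nat) : Int) = (m : Int) + 1 := by push_cast; ring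
      rw [hcast, PySem.List.pyRange_one_succ_right (by exact_mod_cast hm1), List.foldl_append]
      set q := (PySem.List.pyRange 1 (m : Int) 1).foldl (pvStepB A) (List.replicate A.length 0)
        with hq
      have hmn : m < A.length := by omega
      have hstep : pvStepB A q (m : Int)
          = q.set m (pvCnt A m) := by
        unfold pvStepB
        have h1 : ((m : Int) - 1) = ((m - 1 : Nat) : Int) := by omega
        have h2 : ((m : Int) + 1) = ((m + 1 : Nat) : Int) := by omega
        rw [h1, h2, PySem.List.pyGetD_natCast, PySem.List.pyGetD_natCast,
          PySem.List.pyGetD_natCast, PySem.List.pyGetD_natCast, Int.toNat_natCast]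
        have hv : q.getD (m-1) 0 = pvCnt A (m-1) := by
          rw [ihval (m-1)]
          rcases Nat.lt_or_ge m 2 with h | h
          · rw [if_neg (by omega)]
            have : m - 1 = 0 := by omega
            rw [this]; rfl
          · rw [if_pos (by omega)]
        rw [hv, ← pvCnt_succ A m hm1]
      rw [List.foldl_cons, List.foldl_nil, hstep]
      constructor
      · rw [List.length_set, ihlen]
      · intro i
        rw [List.getD_eq_getElem?_getD, List.getElem?_set]
        by_cases hi : m = i
        · subst hi
          rw [if_pos rfl, if_pos (by rwa [ihlen]), if_pos (by omega)]
          rfl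
        · rw [if_neg hi, ← List.getD_eq_getElem?_getD, ihval i]
          by_cases h1 : 1 ≤ i ∧ i < m
          · rw [if_pos h1, if_pos (by omega)]
          · rw [if_neg h1, if_neg (by omega)]

theorem pvQ_cast (A : List Int) (h : 1 ≤ A.length) :
    pvQ A = (PySem.List.pyRange 1 ((A.length - 1 : Nat) : Int) 1).foldl (pvStepB A)
      (List.replicate A.length 0) := by
  unfold pvQ
  have : ((A.length : Int) - 1) = ((A.length - 1 : Nat) : Int) := by omega
  rw [this]

theorem pvQ_len (A : List Int) (h : 1 ≤ A.length) : (pvQ A).length = A.length := by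
  rw [pvQ_cast A h]
  exact (pv_build_spec A (A.length - 1) le_rfl).1

theorem pvQ_getD (A : List Int) (h : 1 ≤ A.length) (i : Nat) :
    (pvQ A).getD i 0 = if 1 ≤ i ∧ i < A.length - 1 then pvCnt A i else 0 := by
  rw [pvQ_cast A h]
  exact (pv_build_spec A (A.length - 1) le_rfl).2 i

theorem pvQ_neg2 (A : List Int) (h : 3 ≤ A.length) :
    PySem.List.pyGetD (pvQ A) (-2) 0 = pvCnt A (A.length - 2) := by
  have h2 : (2 : Nat) ≤ (pvQ A).length := by rw [pvQ_len A (by omega)]; omega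
  have : ((-2 : Int)) = -((2 : Nat) : Int) := by norm_num
  rw [PySem.List.pyGetD, this, PySem.List.pyGet?_neg_natCast _ 2 (by norm_num) h2,
    pvQ_len A (by omega), ← List.getD_eq_getElem?_getD, pvQ_getD A (by omega),
    if_pos (by omega)]

theorem pvQ_sub2 (A : List Int) (h : 3 ≤ A.length) :
    PySem.List.pyGetD (pvQ A) ((A.length : Int) - 2) 0 = pvCnt A (A.length - 2) := by
  have : ((A.length : Int) - 2) = ((A.length - 2 : Nat) : Int) := by omega
  rw [this, PySem.List.pyGetD_natCast, pvQ_getD A (by omega), if_pos (by omega)]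

theorem pvFinal_getD (A : List Int) (h : 3 ≤ A.length) (i : Nat) (hi : i < A.length) :
    (pvFinal A).getD i 0 = pvG A i := by
  rw [pvFinal, pvQ_sub2 A h, List.getD_eq_getElem?_getD, List.getElem?_set]
  by_cases hlast : A.length - 1 = i
  · rw [if_pos hlast, if_pos (by rw [pvQ_len A (by omega)]; omega)]
    have : pvG A i = pvCnt A (A.length - 2) := by
      rw [pvG]; congr 1; omega
    rw [this]; rfl
  · rw [if_neg hlast, ← List.getD_eq_getElem?_getD, pvQ_getD A (by omega), pvG]
    by_cases h1 : 1 ≤ i ∧ i < A.length - 1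
    · rw [if_pos h1]
      congr 1
      omega
    · rw [if_neg h1]
      have : i = 0 := by omega
      subst this
      simp [pvCnt]

theorem pvFinal_read (A : List Int) (h : 3 ≤ A.length) (j : Int) (h0 : 0 ≤ j)
    (h1 : j < (A.length : Int)) :
    PySem.List.pyGetD (pvFinal A) j 0 = pvG A j.toNat := by
  rw [PySem.List.pyGetD_of_nonneg _ _ h0]
  exact pvFinal_getD A h j.toNat (by omega)

theorem pvCnt_mono (A : List Int) {i j : Nat} (h : i ≤ j) : pvCnt A i ≤ pvCnt A j := by
  unfold pvCnt
  have : List.range' 1 i ++ List.range' (1 + 1 * i) (j - i) = List.range' 1 j := by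
    rw [List.range'_append]
    congr 1
    omega
  rw [← this, List.countP_append]
  push_cast
  omega

theorem pvG_mono (A : List Int) {i j : Nat} (h : i ≤ j) : pvG A i ≤ pvG A j := by
  exact pvCnt_mono A (by omega)

theorem pvG_zero (A : List Int) : pvG A 0 = 0 := by
  simp [pvG, pvCnt]

-- A's check for block size n/b coincides with B's check for block count b (b a divisor of n)
theorem pv_check_eq (A : List Int) (hn : 3 ≤ A.length) (b : Nat) (hb1 : 1 ≤ b)
    (hbn : b ≤ A.length) (hdvd : b ∣ A.length) :
    pvCheckA (pvFinal A) (A.length : Int) ((A.length / b : Nat) : Int)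
      = pvVB (pvFinal A) (A.length : Int) (b : Int) := by
  have hbs : b * (A.length / b) = A.length := Nat.mul_div_cancel' hdvd
  set n := A.length with hndef
  set s := n / b with hsdef
  set p := pvFinal A with hpdef
  have hs1 : 1 ≤ s := (Nat.one_le_div_iff (by omega)).mpr hbn
  have hsn : s ≤ n := Nat.div_le_self n b
  have hread : ∀ (j : Int), 0 ≤ j → j < (n : Int) →
      PySem.List.pyGetD p j 0 = pvG A j.toNat := pvFinal_read A hn
  have key : ∀ t : Nat, 1 ≤ t → t < b → s ≤ t*s ∧ t*s + s ≤ n := by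
    intro t ht1 htb
    refine ⟨Nat.le_mul_of_pos_left s (by omega), ?_⟩
    calc t*s + s = (t+1)*s := by ring
      _ ≤ b*s := Nat.mul_le_mul_right s (by omega)
      _ = n := hbs
  have r0 : PySem.List.pyGetD p 0 0 = 0 := by
    rw [hread 0 le_rfl (by exact_mod_cast (show 0 < n by omega))]
    simpa using pvG_zero A
  have r1 : PySem.List.pyGetD p ((s : Int) - 1) 0 = pvG A (s-1) := by
    rw [hread _ (by omega) (by omega)]
    congr 1
    omega
  have e1 : ∀ t : Nat, 1 ≤ t → t < b →
      PySem.List.pyGetD p (((t*s : Nat) : Int) - 1) 0 = pvG A (t*s - 1) := by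
    intro t ht1 htb
    obtain ⟨k1, k2⟩ := key t ht1 htb
    rw [hread _ (by push_cast; omega) (by push_cast; omega)]
    congr 1
    omega
  have e2 : ∀ t : Nat, 1 ≤ t → t < b →
      PySem.List.pyGetD p (((t*s : Nat) : Int) + (s : Int) - 1) 0 = pvG A (t*s + s - 1) := by
    intro t ht1 htb
    obtain ⟨k1, k2⟩ := key t ht1 htb
    rw [hread _ (by push_cast; omega) (by push_cast; omega)]
    congr 1
    omega
  have hPA : pvCheckA p (n : Int) (s : Int) = true ↔
      (0 < pvG A (s-1) ∧ ∀ t : Nat, 1 ≤ t → t < b → pvG A (t*s-1) < pvG A (t*s+s-1)) := by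
    unfold pvCheckA
    rw [Bool.and_eq_true, decide_eq_true_eq, r0, r1, List.all_eq_true]
    constructor
    · rintro ⟨h0, hall⟩
      refine ⟨h0, fun t ht1 htb => ?_⟩
      obtain ⟨k1, k2⟩ := key t ht1 htb
      have hmem : ((t*s : Nat) : Int) ∈ PySem.List.pyRange (s : Int) (n : Int) (s : Int) := by
        rw [PySem.List.mem_pyRange_iff_of_pos (by exact_mod_cast hs1)]
        refine ⟨by exact_mod_cast k1, by push_cast; omega, ⟨(t : Int) - 1, by push_cast; ring⟩⟩
      have hne := hall _ hmem
      rw [e1 t ht1 htb, e2 t ht1 htb] at hne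
      simp only [Bool.not_eq_eq_eq_not, Bool.not_true, beq_eq_false_iff_ne, ne_eq] at hne
      exact lt_of_le_of_ne (pvG_mono A (by omega)) hne
    · rintro ⟨h0, hall⟩
      refine ⟨h0, fun x hx => ?_⟩
      rw [PySem.List.mem_pyRange_iff_of_pos (by exact_mod_cast hs1)] at hx
      obtain ⟨hx1, hx2, c, hc⟩ := hx
      have hc0 : 0 ≤ c := by
        by_contra hneg
        have hb1' : (s : Int) * c ≤ (s : Int) * (-1) :=
          mul_le_mul_of_nonneg_left (by omega) (by positivity)
        omega
      have hct : (c.toNat : Int) = c := Int.toNat_of_nonneg hc0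
      have hx_eq : x = (((c.toNat + 1)*s : Nat) : Int) := by
        push_cast
        rw [hct]
        linear_combination hc
      set t : Nat := c.toNat + 1 with htdef
      have ht1 : 1 ≤ t := by omega
      have htb : t < b := by
        have : t * s < b * s := by
          rw [hbs]
          exact_mod_cast hx_eq ▸ hx2
        exact Nat.lt_of_mul_lt_mul_right this
      rw [hx_eq, e1 t ht1 htb, e2 t ht1 htb]
      simp only [Bool.not_eq_eq_eq_not, Bool.not_true, beq_eq_false_iff_ne, ne_eq]
      exact ne_of_lt (hall t ht1 htb)
  have hPB : pvVB p (n : Int) (b : Int) = true ↔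
      (0 < pvG A (s-1) ∧ ∀ t : Nat, 1 ≤ t → t < b → pvG A (t*s-1) < pvG A (t*s+s-1)) := by
    unfold pvVB
    rw [PySem.Int.floordiv_natCast, ← hsdef, Bool.and_eq_true, decide_eq_true_eq,
      List.all_eq_true]
    constructor
    · rintro ⟨-, hall⟩
      constructor
      · have h0 := hall 0 (by rw [PySem.List.mem_pyRange_one]; constructor <;> [rfl; exact_mod_cast hb1])
        simp only [ne_eq, not_true_eq_false, zero_mul, zero_add, decide_eq_true_eq,
          if_false] at h0
        simpa [r1] using h0
      · intro t ht1 htb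
        have hmem : ((t : Nat) : Int) ∈ PySem.List.pyRange 0 (b : Int) 1 := by
          rw [PySem.List.mem_pyRange_one]
          constructor <;> [positivity; exact_mod_cast htb]
        have hterm := hall _ hmem
        rw [if_pos (by exact_mod_cast (show (t:Int) ≠ 0 by omega))] at hterm
        rw [show ((t:Int) * (s:Int) + (s:Int) - 1) = ((t*s : Nat) : Int) + (s:Int) - 1 by
              push_cast; ring,
            show ((t:Int) * (s:Int) - 1) = ((t*s : Nat) : Int) - 1 by push_cast; ring,
            e1 t ht1 htb, e2 t ht1 htb, decide_eq_true_eq] at hterm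
        exact hterm
    · rintro ⟨h0, hall⟩
      refine ⟨by exact_mod_cast hdvd, fun k hk => ?_⟩
      rw [PySem.List.mem_pyRange_one] at hk
      obtain ⟨hk0, hkb⟩ := hk
      have hkt : k = ((k.toNat : Nat) : Int) := by omega
      by_cases hk00 : k = 0
      · subst hk00
        rw [if_neg (by simp), decide_eq_true_eq]
        simpa [r1] using h0
      · have ht1 : 1 ≤ k.toNat := by omega
        have htb : k.toNat < b := by omega
        rw [if_pos hk00, decide_eq_true_eq, hkt,
            show ((k.toNat : Int) * (s:Int) + (s:Int) - 1)
              = ((k.toNat*s : Nat) : Int) + (s:Int) - 1 by push_cast; ring,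
            show ((k.toNat : Int) * (s:Int) - 1) = ((k.toNat*s : Nat) : Int) - 1 by
              push_cast; ring,
            e1 k.toNat ht1 htb, e2 k.toNat ht1 htb]
        exact hall k.toNat ht1 htb
  by_cases hA : pvCheckA p (n : Int) (s : Int) = true
  · rw [hA, hPB.mpr (hPA.mp hA)]
  · have hB : ¬ pvVB p (n : Int) (b : Int) = true := fun hB => hA (hPA.mpr (hPB.mp hB))
    rw [Bool.not_eq_true] at hA hB
    rw [hA, hB]

theorem pvVB_not_dvd (p : List Int) (n b : Int) (h : ¬ b ∣ n) : pvVB p n b = false := by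
  unfold pvVB
  rw [decide_eq_false h, Bool.false_and]

theorem pvBest_succ_false (p : List Int) (n : Int) (k : Nat)
    (h : pvVB p n ((k+1 : Nat) : Int) = false) : pvBest p n (k+1) = pvBest p n k := by
  have h' : pvVB p n ((k : Int) + 1) = false := by
    have hc : ((k+1 : Nat) : Int) = (k : Int) + 1 := by push_cast; ring
    rwa [hc] at h
  rw [pvBest, h']
  simp

theorem pvBest_succ_true (p : List Int) (n : Int) (k : Nat)
    (h : pvVB p n ((k+1 : Nat) : Int) = true) : pvBest p n (k+1) = ((k+1 : Nat) : Int) := by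
  have h' : pvVB p n ((k : Int) + 1) = true := by
    have hc : ((k+1 : Nat) : Int) = (k : Int) + 1 := by push_cast; ring
    rwa [hc] at h
  rw [pvBest, h']
  simp

theorem pv_best_peel (p : List Int) (n : Int) (j k : Nat) (hkj : k ≤ j)
    (h : ∀ b : Nat, k < b → b ≤ j → pvVB p n (b : Int) = false) :
    pvBest p n j = pvBest p n k := by
  induction j with
  | zero =>
    have : k = 0 := by omega
    subst this
    rfl
  | succ j ih =>
    rcases Nat.eq_or_lt_of_le hkj with he | hlt
    · rw [he]
    · have hk' : k ≤ j := by omega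
      rw [pvBest_succ_false p n j (h (j+1) (by omega) le_rfl)]
      exact ih hk' (fun b h1 h2 => h b h1 (by omega))

theorem pv_best_hit (p : List Int) (n : Int) (t j : Nat) (htj : t ≤ j)
    (ht : pvVB p n (t : Int) = true)
    (h : ∀ b : Nat, t < b → b ≤ j → pvVB p n (b : Int) = false) :
    pvBest p n j = (t : Int) := by
  induction j with
  | zero =>
    have : t = 0 := by omega
    subst this
    rfl
  | succ j ih =>
    rcases Nat.eq_or_lt_of_le htj with he | hlt
    · subst he
      exact pvBest_succ_true p n j ht
    · rw [pvBest_succ_false p n j (h (j+1) (by omega) le_rfl)]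
      exact ih (by omega) (fun b h1 h2 => h b h1 (by omega))

theorem pvLoopB_cons (p : List Int) (n c : Int) (rest : List Int) :
    pvLoopB p n (c :: rest) = if pvVB p n c then c else pvLoopB p n rest := by
  rw [pvLoopB]
  unfold pvVB
  by_cases hd : c ∣ n
  · have hmod : PySem.Int.mod n c = 0 := (PySem.Int.mod_eq_zero_iff_dvd n c).mpr hd
    simp only [hmod, beq_self_eq_true, if_true, decide_eq_true hd, Bool.true_and]
  · have hmod : ¬ PySem.Int.mod n c = 0 := fun hc => hd ((PySem.Int.mod_eq_zero_iff_dvd n c).mp hc)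
    simp only [decide_eq_false hd, Bool.false_and, Bool.false_eq_true, if_false]
    simp [beq_iff_eq, hmod]

theorem pv_loopB_eq (p : List Int) (n : Int) (k : Nat) :
    pvLoopB p n (PySem.List.pyRange (k : Int) 0 (-1)) = pvBest p n k := by
  induction k with
  | zero =>
    rw [Nat.cast_zero, PySem.List.pyRange_neg_one_eq_nil le_rfl]
    rfl
  | succ k ih =>
    rw [PySem.List.pyRange_neg_one_cons (by push_cast; omega),
      show ((k+1 : Nat) : Int) - 1 = (k : Int) by push_cast; ring, pvLoopB_cons]
    cases hv : pvVB p n ((k+1 : Nat) : Int) with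
    | true =>
      rw [if_pos rfl]
      exact (pvBest_succ_true p n k hv).symm
    | false =>
      rw [if_neg (by simp), pvBest_succ_false p n k hv]
      exact ih

theorem pvLoopA_cons (p : List Int) (n c : Int) (rest : List Int) (mb : Int) :
    pvLoopA p n (c :: rest) mb =
      if PySem.Int.mod n c == 0 then
        (if c * c == n then
          pvLoopA p n rest (if pvCheckA p n (PySem.Int.floordiv n c) then c else mb)
        else if pvCheckA p n c then PySem.Int.floordiv n c
        else pvLoopA p n rest (if pvCheckA p n (PySem.Int.floordiv n c) then c else mb))
      else pvLoopA p n rest mb := rfl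

theorem pvBest_eq_ite (p : List Int) (n : Int) (k : Nat) (hk : 1 ≤ k) :
    pvBest p n k = if pvVB p n (k : Int) then (k : Int) else pvBest p n (k-1) := by
  obtain ⟨k', rfl⟩ : ∃ k', k = k' + 1 := ⟨k - 1, by omega⟩
  have hc : ((k' + 1 : Nat) : Int) = (k' : Int) + 1 := by push_cast; ring
  rw [pvBest, Nat.add_sub_cancel, hc]

theorem pv_div_le_sqrt (n b : Nat) (hb : Nat.sqrt n < b) (hb0 : 0 < b) :
    n / b ≤ Nat.sqrt n := by
  have h1 : n < (Nat.sqrt n + 1) * b := by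
    calc n < (Nat.sqrt n + 1) * (Nat.sqrt n + 1) := by
            simpa [Nat.succ_eq_add_one] using Nat.lt_succ_sqrt n
      _ ≤ (Nat.sqrt n + 1) * b := Nat.mul_le_mul_left _ (by omega)
  exact Nat.lt_succ_iff.mp ((Nat.div_lt_iff_lt_mul hb0).mpr h1)

theorem pv_sqrt_lt_div (n c : Nat) (hd : c ∣ n) (hc1 : 1 ≤ c) (hcs : c ≤ Nat.sqrt n)
    (hne : c * c ≠ n) : Nat.sqrt n < n / c := by
  rcases Nat.lt_or_ge (Nat.sqrt n) (n / c) with h | hle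
  · exact h
  · exfalso
    have h1 : n = c * (n / c) := (Nat.mul_div_cancel' hd).symm
    have h2 : c * (n / c) ≤ c * Nat.sqrt n := Nat.mul_le_mul_left _ hle
    have h3 : c * Nat.sqrt n ≤ Nat.sqrt n * Nat.sqrt n := Nat.mul_le_mul_right _ hcs
    have h4 : Nat.sqrt n * Nat.sqrt n ≤ n := Nat.sqrt_le n
    have heq2 : c * (n / c) = c * Nat.sqrt n := by omega
    have hdiv : n / c = Nat.sqrt n := Nat.eq_of_mul_eq_mul_left (by omega) heq2
    have heq3 : c * Nat.sqrt n = Nat.sqrt n * Nat.sqrt n := by omega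
    have hsq0 : 0 < Nat.sqrt n := by omega
    have hc' : c = Nat.sqrt n := Nat.eq_of_mul_eq_mul_right hsq0 heq3
    apply hne
    rw [h1, hdiv, hc']

theorem pv_tail_false (A : List Int) (hn : 3 ≤ A.length) (c0 : Nat)
    (hyp : ∀ c : Nat, 1 ≤ c → c < c0 → c ∣ A.length → c * c ≠ A.length →
        pvVB (pvFinal A) (A.length : Int) ((A.length / c : Nat) : Int) = false)
    (b : Nat) (hbs : Nat.sqrt A.length < b) (hbn : b ≤ A.length)
    (hbb : A.length / b < c0) :
    pvVB (pvFinal A) (A.length : Int) (b : Int) = false := by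
  by_cases hd : b ∣ A.length
  · set cq := A.length / b with hcq
    have hc1 : 1 ≤ cq := (Nat.one_le_div_iff (by omega)).mpr hbn
    have hcs : cq ≤ Nat.sqrt A.length := pv_div_le_sqrt A.length b hbs (by omega)
    have hcsq : cq * cq ≠ A.length := by
      intro he
      have h5 : A.length / cq = cq := by
        rw [← he]
        exact Nat.mul_div_cancel _ (by omega)
      have hb' : b = A.length / cq := (Nat.div_div_self hd (by omega)).symm
      omega
    have hres := hyp (A.length / b) hc1 (by omega) (Nat.div_dvd_of_dvd hd) hcsq
    rwa [Nat.div_div_self hd (by omega)] at hres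
  · exact pvVB_not_dvd _ _ _ (fun hc => hd (by exact_mod_cast hc))

theorem pv_loopA_eq (A : List Int) (hn : 3 ≤ A.length) :
    ∀ (d c0 : Nat), 1 ≤ c0 → c0 + d = Nat.sqrt A.length + 1 →
    (∀ c : Nat, 1 ≤ c → c < c0 → c ∣ A.length → c * c ≠ A.length →
        pvVB (pvFinal A) (A.length : Int) ((A.length / c : Nat) : Int) = false) →
    pvLoopA (pvFinal A) (A.length : Int)
        (PySem.List.pyRange (c0 : Int) ((Nat.sqrt A.length : Int) + 1) 1)
        (pvBest (pvFinal A) (A.length : Int) (c0 - 1))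
      = pvBest (pvFinal A) (A.length : Int) A.length := by
  intro d
  induction d with
  | zero =>
    intro c0 hc01 hsum hyp
    have hc0 : c0 = Nat.sqrt A.length + 1 := by omega
    subst hc0
    rw [PySem.List.pyRange_one_eq_nil (by push_cast; omega)]
    show pvBest (pvFinal A) (A.length : Int) (Nat.sqrt A.length + 1 - 1)
      = pvBest (pvFinal A) (A.length : Int) A.length
    rw [Nat.add_sub_cancel]
    symm
    apply pv_best_peel _ _ A.length (Nat.sqrt A.length) (Nat.sqrt_le_self A.length)
    intro b hb1 hb2
    exact pv_tail_false A hn (Nat.sqrt A.length + 1) hyp b hb1 hb2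
      (by have := pv_div_le_sqrt A.length b hb1 (by omega); omega)
  | succ d ih =>
    intro c0 hc01 hsum hyp
    have hc0m : c0 ≤ Nat.sqrt A.length := by omega
    have hc0n : c0 ≤ A.length := le_trans hc0m (Nat.sqrt_le_self A.length)
    have hcast1 : ((c0 + 1 : Nat) : Int) = (c0 : Int) + 1 := by push_cast; ring
    have hih := ih (c0+1) (by omega) (by omega)
    rw [hcast1, Nat.add_sub_cancel] at hih
    rw [PySem.List.pyRange_one_cons (by omega), pvLoopA_cons]
    by_cases hd : c0 ∣ A.length
    · have hmod : (PySem.Int.mod (A.length : Int) (c0 : Int) == 0) = true := by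
        rw [beq_iff_eq]
        exact (PySem.Int.mod_eq_zero_iff_dvd _ _).mpr (by exact_mod_cast hd)
      rw [hmod, if_pos rfl, PySem.Int.floordiv_natCast,
        pv_check_eq A hn c0 hc01 hc0n hd]
      have hacc : (if pvVB (pvFinal A) (A.length : Int) (c0 : Int) then (c0 : Int)
            else pvBest (pvFinal A) (A.length : Int) (c0 - 1))
          = pvBest (pvFinal A) (A.length : Int) c0 := (pvBest_eq_ite _ _ c0 hc01).symm
      rw [hacc]
      have hnc1 : 1 ≤ A.length / c0 := (Nat.one_le_div_iff (by omega)).mpr hc0n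
      by_cases hsq : c0 * c0 = A.length
      · have hsqb : (((c0 : Int) * (c0 : Int)) == (A.length : Int)) = true := by
          rw [beq_iff_eq]
          exact_mod_cast hsq
        rw [hsqb, if_pos rfl]
        apply hih
        intro c h1 h2 h3 h4
        rcases Nat.lt_or_ge c c0 with hlt | hge
        · exact hyp c h1 hlt h3 h4
        · exact absurd (by omega : c = c0) (fun he => h4 (he ▸ hsq))
      · have hsqb : (((c0 : Int) * (c0 : Int)) == (A.length : Int)) = false := by
          rw [beq_eq_false_iff_ne]
          exact fun he => hsq (by exact_mod_cast he)
        rw [hsqb, if_neg (by simp)]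
        have hc0b : c0 = A.length / (A.length / c0) := (Nat.div_div_self hd (by omega)).symm
        have hCA2 : pvCheckA (pvFinal A) (A.length : Int) (c0 : Int)
            = pvVB (pvFinal A) (A.length : Int) ((A.length / c0 : Nat) : Int) := by
          conv_lhs => rw [hc0b]
          exact pv_check_eq A hn (A.length / c0) hnc1 (Nat.div_le_self _ _)
            (Nat.div_dvd_of_dvd hd)
        rw [hCA2]
        cases hv : pvVB (pvFinal A) (A.length : Int) ((A.length / c0 : Nat) : Int) with
        | true =>
          rw [if_pos rfl]
          symm
          apply pv_best_hit _ _ (A.length / c0) A.length (Nat.div_le_self _ _) hv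
          intro b hb1 hb2
          have hsqlt : Nat.sqrt A.length < A.length / c0 :=
            pv_sqrt_lt_div A.length c0 hd hc01 hc0m hsq
          have hmul : c0 * (A.length / c0) = A.length := Nat.mul_div_cancel' hd
          have hbb : A.length / b < c0 := by
            have hstep : A.length / b ≤ A.length / (A.length / c0 + 1) :=
              Nat.div_le_div_left (by omega) (by omega)
            have hlast : A.length / (A.length / c0 + 1) < c0 := by
              rw [Nat.div_lt_iff_lt_mul (by omega), Nat.mul_add, Nat.mul_one, hmul]
              omega
            omega
          exact pv_tail_false A hn c0 hyp b (by omega) hb2 hbb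
        | false =>
          rw [if_neg (by simp)]
          apply hih
          intro c h1 h2 h3 h4
          rcases Nat.lt_or_ge c c0 with hlt | hge
          · exact hyp c h1 hlt h3 h4
          · have : c = c0 := by omega
            subst this
            exact hv
    · have hmod : (PySem.Int.mod (A.length : Int) (c0 : Int) == 0) = false := by
        rw [beq_eq_false_iff_ne]
        exact fun hc => hd (by exact_mod_cast (PySem.Int.mod_eq_zero_iff_dvd _ _).mp hc)
      rw [hmod, if_neg (by simp)]
      have hstep : pvBest (pvFinal A) (A.length : Int) (c0 - 1)
          = pvBest (pvFinal A) (A.length : Int) c0 := by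
        rw [pvBest_eq_ite _ _ c0 hc01,
          pvVB_not_dvd _ _ _ (fun hc => hd (by exact_mod_cast hc))]
        simp
      rw [hstep]
      apply hih
      intro c h1 h2 h3 h4
      rcases Nat.lt_or_ge c c0 with hlt | hge
      · exact hyp c h1 hlt h3 h4
      · have hce : c = c0 := by omega
        exact absurd (hce ▸ h3) hd

-- ===== VERDICT (by name: the statement is the Claim_ definition above) =====
theorem solution_spec : Claim_equal_solution := by
  intro A _hdom
  show solution A = solution_alt A
  simp only [solution, solution_alt]
  rw [pv_fold_eq A]
  have hb : (PySem.List.pyRange 1 ((A.length : Int) - 1) 1).foldl (pvStepB A)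
      (List.replicate A.length 0) = pvQ A := rfl
  rw [hb]
  by_cases hn3 : (A.length : Int) < 3
  · rw [if_pos (Or.inl hn3), if_pos hn3]
  · have hn : 3 ≤ A.length := by omega
    rw [if_neg hn3, pvQ_neg2 A hn, pvQ_sub2 A hn]
    have hfin : (pvQ A).set (A.length - 1) (pvCnt A (A.length - 2)) = pvFinal A := by
      rw [pvFinal, pvQ_sub2 A hn]
    rw [hfin]
    have hg : PySem.List.pyGetD (pvFinal A) ((A.length : Int) - 1) 0
        = pvCnt A (A.length - 2) := by
      rw [pvFinal_read A hn _ (by omega) (by omega), pvG]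
      congr 1
      omega
    rw [hg]
    by_cases hc : pvCnt A (A.length - 2) = 0
    · rw [if_pos (Or.inr hc), if_pos (by rw [beq_iff_eq]; exact hc)]
    · have hcb : (pvCnt A (A.length - 2) == (0 : Int)) = false := beq_eq_false_iff_ne.mpr hc
      rw [if_neg (fun h => h.elim (fun h1 => hn3 h1) (fun h2 => hc h2)), hcb,
        if_neg (by simp), pv_loopB_eq (pvFinal A) (A.length : Int) A.length]
      have hA := pv_loopA_eq A hn (Nat.sqrt A.length) 1 le_rfl (by omega)
        (fun c h1 h2 h3 h4 => absurd h2 (by omega))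
      rw [show ((1 : Nat) : Int) = 1 by norm_num, Nat.sub_self,
        show pvBest (pvFinal A) ((A.length : Int)) 0 = 0 from rfl] at hA
      exact hA
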